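-- pv_equiv track=rewrite | github.com/hkl690/Python_CodePath_Sessions | PythonPractice/Unit3sessions_Oct.py | process_chars
-- ===== SOURCE A (Python) =====
-- from collections import deque
-- from collections import deque
--
-- def process_chars(elements):
--     queue = deque()
--     stack = []
--
--     for element in elements:
--         queue.append(element)
--
--     while queue:
--         item = queue.popleft()
--         stack.append(item)
--
--         if len(stack)  % 2 == 0 and queue:
--             stack.pop()
--
--     return list(stack)
-- ===== SOURCE B (Python) =====
-- def process_chars(elements):
--     items = list(elements)
--     if not items:
--         return []
--     if len(items) == 1:
--         return [items[0]]
--     return [items[0], items[-1]]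
-- ===== Notes on version B (the rewrite author's own statement) =====
-- stated objective: simpler
-- what changed: Replaced the queue/stack parity simulation with a direct length-based case analysis returning [] / [first] / [first, last].
import Mathlib
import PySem

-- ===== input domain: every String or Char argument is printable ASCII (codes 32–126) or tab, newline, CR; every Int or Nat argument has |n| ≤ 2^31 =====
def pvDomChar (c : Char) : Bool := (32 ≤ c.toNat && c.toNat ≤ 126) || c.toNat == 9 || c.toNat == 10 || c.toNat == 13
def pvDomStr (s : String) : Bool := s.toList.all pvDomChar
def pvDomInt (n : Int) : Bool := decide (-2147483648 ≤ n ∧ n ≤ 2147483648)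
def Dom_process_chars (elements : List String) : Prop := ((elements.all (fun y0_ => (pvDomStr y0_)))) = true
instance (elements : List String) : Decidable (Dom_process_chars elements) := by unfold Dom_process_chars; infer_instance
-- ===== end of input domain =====

-- B replaces the queue/stack parity simulation with a direct case split on length: [] / [first] / [first, last].


-- ===== PORT A =====
-- the while-loop: queue is the remaining deque, stack the accumulated list
def pcLoop : List String → List String → List String
  | [], stack => stack
  | item :: queue, stack =>
      let stack1 := stack ++ [item]
      let stack2 := if stack1.length % 2 == 0 && !queue.isEmpty then stack1.dropLast else stack1
      pcLoop queue stack2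

def process_chars (elements : List String) : List String := pcLoop elements []

-- ===== PORT B =====
def process_chars_alt (elements : List String) : List String :=
  match elements with
  | [] => []
  | [x] => [x]
  | x :: y :: rest => [x, List.getLastD (y :: rest) x]

-- ===== PRECONDITION & SPEC =====
def Spec_process_chars (elements : List String) (out : List String) : Prop := out = process_chars_alt elements
instance (elements : List String) (out : List String) : Decidable (Spec_process_chars elements out) := by unfold Spec_process_chars; infer_instance

-- ===== CLAIM (what is proved, stated in full; the proofs are below) =====
def Claim_equal_process_chars : Prop := ∀ (elements : List String), Dom_process_chars elements → Spec_process_chars elements (process_chars elements)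

-- ===== LEMMAS AND PROOFS =====
-- Invariant: with one element e0 on the stack (odd length), the loop keeps
-- popping back to [e0] until the queue empties, leaving [e0, last].
lemma pcLoop_single (q : List String) : ∀ e0 d,
    pcLoop q [e0] = if q.isEmpty then [e0] else [e0, q.getLastD d] := by
  induction q with
  | nil => intro e0 d; simp [pcLoop]
  | cons x rest ih =>
      intro e0 d
      cases rest with
      | nil => simp [pcLoop]
      | cons y r =>
          have h : pcLoop (x :: y :: r) [e0] = pcLoop (y :: r) [e0] := by
            simp [pcLoop]
          rw [h, ih e0 d]
          simp

-- ===== VERDICT (by name: the statement is the Claim_ definition above) =====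
theorem process_chars_spec : Claim_equal_process_chars := by
  intro elements _
  unfold Spec_process_chars process_chars process_chars_alt
  match elements with
  | [] => rfl
  | [x] => simp [pcLoop]
  | x :: y :: rest =>
      have h1 : pcLoop (x :: y :: rest) [] = pcLoop (y :: rest) [x] := by
        simp [pcLoop]
      rw [h1, pcLoop_single (y :: rest) x x]
      simp
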